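-- pv_equiv track=rewrite | github.com/jdfalk/ghcommon | scripts/update-calling-workflows.py | merge_permissions
-- ===== SOURCE A (Python) =====
-- from typing import Dict, Any, List
--
-- def merge_permissions(perm_dicts: List[Dict[str, str]]) -> Dict[str, str]:
--     """Merge multiple permission dictionaries, preferring 'write' over 'read'."""
--     merged = {}
--
--     for perm_dict in perm_dicts:
--         for key, value in perm_dict.items():
--             if key not in merged:
--                 merged[key] = value
--             else:
--                 # Prefer 'write' over 'read'
--                 if value == "write" or merged[key] == "read":
--                     merged[key] = value
--
--     return merged
-- ===== SOURCE B (Python) =====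
-- def merge_permissions(perm_dicts):
--     """Merge multiple permission dictionaries, preferring 'write' over 'read'."""
--     # Pass 1: group each key's values in encounter order (dict keeps first-seen key order).
--     groups = {}
--     for perm_dict in perm_dicts:
--         for key, value in perm_dict.items():
--             groups[key] = groups.get(key, []) + [value]
--     # Pass 2: closed-form resolution per key.
--     merged = {}
--     for key, values in groups.items():
--         if "write" in values:
--             merged[key] = "write"
--         else:
--             merged[key] = next((v for v in values if v != "read"), "read")
--     return merged
-- ===== Notes on version B (the rewrite author's own statement) =====
-- stated objective: alternative
-- what changed: A interleaves merging into one dict with a per-entry overwrite rule; B first groups each key's values in encounter order, then resolves each key by the closed-form rule 'write' if present, else the first non-'read' value, else 'read'.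
import Mathlib
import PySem

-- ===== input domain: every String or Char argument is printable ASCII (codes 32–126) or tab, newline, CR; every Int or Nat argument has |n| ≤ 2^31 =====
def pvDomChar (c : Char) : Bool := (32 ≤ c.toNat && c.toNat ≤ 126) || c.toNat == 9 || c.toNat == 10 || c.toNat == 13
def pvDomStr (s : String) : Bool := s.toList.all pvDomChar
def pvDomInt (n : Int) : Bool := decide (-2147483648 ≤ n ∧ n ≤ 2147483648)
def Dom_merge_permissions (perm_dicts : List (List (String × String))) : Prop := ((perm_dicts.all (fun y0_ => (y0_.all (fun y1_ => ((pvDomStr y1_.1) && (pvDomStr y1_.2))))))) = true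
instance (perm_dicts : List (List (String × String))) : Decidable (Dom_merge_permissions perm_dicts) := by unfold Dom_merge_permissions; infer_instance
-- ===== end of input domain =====

-- B groups each key's values first, then resolves each key by a closed-form rule
-- (write if present, else first non-read value, else read); same return value as A.

-- ===== PORT A =====
-- one iteration of A's inner loop body (merged[key] read is guarded by 'key in merged', so getD is exact)
def pvAStep (merged : PySem.Dict String String) (p : String × String) : PySem.Dict String String :=
  if merged.contains p.1 = false then merged.insert p.1 p.2
  else if p.2 == "write" || merged.getD p.1 "" == "read" then merged.insert p.1 p.2
  else merged

def merge_permissions (perm_dicts : List (List (String × String))) : List (String × String) :=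
  (perm_dicts.foldl (fun merged perm_dict => perm_dict.foldl pvAStep merged)
    PySem.Dict.empty).items

-- ===== PORT B =====
-- closed-form per-key resolution: 'write' if present, else first value ≠ 'read', else 'read'
def pvResolve (values : List String) : String :=
  if values.contains "write" then "write"
  else ((values.find? (fun v => v != "read")).getD "read")

def merge_permissions_alt (perm_dicts : List (List (String × String))) : List (String × String) :=
  let groups := perm_dicts.foldl (fun g perm_dict =>
      perm_dict.foldl (fun g p => g.modify p.1 [] (fun vs => vs ++ [p.2])) g)
    PySem.Dict.empty
  (groups.items.foldl (fun merged p => merged.insert p.1 (pvResolve p.2))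
    PySem.Dict.empty).items

-- ===== PRECONDITION & SPEC =====
def Spec_merge_permissions (perm_dicts : List (List (String × String))) (out : List (String × String)) : Prop := out = merge_permissions_alt perm_dicts
instance (perm_dicts : List (List (String × String))) (out : List (String × String)) : Decidable (Spec_merge_permissions perm_dicts out) := by unfold Spec_merge_permissions; infer_instance

-- ===== CLAIM (what is proved, stated in full; the proofs are below) =====
def Claim_equal_merge_permissions : Prop := ∀ (perm_dicts : List (List (String × String))), Dom_merge_permissions perm_dicts → Spec_merge_permissions perm_dicts (merge_permissions perm_dicts)

-- ===== LEMMAS AND PROOFS =====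

-- A's per-key update rule, as a function of the current value and the next value
def pvStep (cur v : String) : String := if v == "write" || cur == "read" then v else cur

-- B's grouping step
def pvGStep (g : PySem.Dict String (List String)) (p : String × String) : PySem.Dict String (List String) :=
  g.modify p.1 [] (fun vs => vs ++ [p.2])

lemma pvStep_foldl_of_ne_read (vs : List String) (cur : String) (h : cur ≠ "read") :
    vs.foldl pvStep cur = if vs.contains "write" then "write" else cur := by
  induction vs generalizing cur with
  | nil => simp
  | cons v t ih =>
    by_cases hv : v = "write"
    · subst hv
      have : pvStep cur "write" = "write" := by simp [pvStep]
      simp [this, ih "write" (by decide)]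
    · have hstep : pvStep cur v = cur := by
        simp [pvStep, hv, h]
      have hwv : ¬ "write" = v := Ne.symm hv
      simp [hstep, ih cur h, hwv]

lemma pvResolve_eq_foldl (vs : List String) :
    vs.foldl pvStep "read" = pvResolve vs := by
  induction vs with
  | nil => simp [pvResolve]
  | cons v t ih =>
    have hstep : pvStep "read" v = v := by simp [pvStep]
    by_cases hv : v = "read"
    · subst hv
      simp only [List.foldl_cons, hstep, ih]
      simp [pvResolve]
    · simp only [List.foldl_cons, hstep]
      rw [pvStep_foldl_of_ne_read t v hv]
      by_cases hw : v = "write"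
      · subst hw
        simp [pvResolve]
      · have hwv : ¬ "write" = v := Ne.symm hw
        simp [pvResolve, hwv, hv]

-- the invariant tying A's merged dict to B's groups dict
def pvRel (d : PySem.Dict String String) (g : PySem.Dict String (List String)) : Prop :=
  d.keys = g.keys ∧ ∀ k, d.get? k = (g.get? k).map (fun vs => vs.foldl pvStep "read")

lemma pvRel_step (d : PySem.Dict String String) (g : PySem.Dict String (List String))
    (p : String × String) (h : pvRel d g) : pvRel (pvAStep d p) (pvGStep g p) := by
  obtain ⟨hk, hv⟩ := h
  have hcont : d.contains p.1 = g.contains p.1 := by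
    rw [PySem.Dict.contains_eq_decide_mem_keys, PySem.Dict.contains_eq_decide_mem_keys, hk]
  have hg : pvGStep g p = g.insert p.1 (g.getD p.1 [] ++ [p.2]) := rfl
  by_cases hc : g.contains p.1 = true
  · -- key already present in both
    have hds : ∃ vs, g.get? p.1 = some vs := by
      rcases hgp : g.get? p.1 with _ | vs
      · rw [PySem.Dict.get?_eq_none_iff_contains] at hgp
        simp [hgp] at hc
      · exact ⟨vs, rfl⟩
    obtain ⟨vs, hvs⟩ := hds
    have hdg : d.get? p.1 = some (vs.foldl pvStep "read") := by rw [hv p.1, hvs]; rfl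
    have hget : d.getD p.1 "" = vs.foldl pvStep "read" :=
      PySem.Dict.getD_of_get?_eq_some _ _ hdg
    have hgget : g.getD p.1 [] = vs := PySem.Dict.getD_of_get?_eq_some _ _ hvs
    have hdc : d.contains p.1 = true := by rw [hcont]; exact hc
    have hA : pvAStep d p =
        if p.2 == "write" || (vs.foldl pvStep "read") == "read" then d.insert p.1 p.2 else d := by
      simp [pvAStep, hdc, hget]
    constructor
    · rw [hA, hg, PySem.Dict.keys_insert_of_contains g _ hc]
      split
      · rw [PySem.Dict.keys_insert_of_contains d _ hdc]; exact hk
      · exact hk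
    · intro k
      by_cases hkp : k = p.1
      · subst hkp
        rw [hA, hg, PySem.Dict.get?_insert_self, hgget]
        have hfold : (vs ++ [p.2]).foldl pvStep "read" = pvStep (vs.foldl pvStep "read") p.2 := by
          simp [List.foldl_append]
        split
        · rename_i hcond
          rw [PySem.Dict.get?_insert_self]
          simp only [Option.map_some, hfold, pvStep]
          rw [if_pos hcond]
        · rename_i hcond
          rw [hdg]
          simp only [Option.map_some, hfold, pvStep]
          rw [if_neg hcond]
      · rw [hA, hg, PySem.Dict.get?_insert_of_ne g _ hkp]
        split
        · rw [PySem.Dict.get?_insert_of_ne d _ hkp]; exact hv k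
        · exact hv k
  · -- fresh key in both
    have hc' : g.contains p.1 = false := by simpa using hc
    have hdc : d.contains p.1 = false := by rw [hcont]; exact hc'
    have hA : pvAStep d p = d.insert p.1 p.2 := by simp [pvAStep, hdc]
    have hgget : g.getD p.1 [] = [] := PySem.Dict.getD_of_not_contains _ _ hc'
    constructor
    · rw [hA, hg, PySem.Dict.keys_insert_of_not_contains d _ hdc,
        PySem.Dict.keys_insert_of_not_contains g _ hc', hk]
    · intro k
      by_cases hkp : k = p.1
      · subst hkp
        rw [hA, hg, PySem.Dict.get?_insert_self, PySem.Dict.get?_insert_self, hgget]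
        simp [pvStep]
      · rw [hA, hg, PySem.Dict.get?_insert_of_ne d _ hkp, PySem.Dict.get?_insert_of_ne g _ hkp]
        exact hv k

lemma pvRel_foldl (L : List (String × String)) (d : PySem.Dict String String)
    (g : PySem.Dict String (List String)) (h : pvRel d g) :
    pvRel (L.foldl pvAStep d) (L.foldl pvGStep g) := by
  induction L generalizing d g with
  | nil => exact h
  | cons p t ih => exact ih _ _ (pvRel_step d g p h)

lemma pvRel_nested (Ls : List (List (String × String))) (d : PySem.Dict String String)
    (g : PySem.Dict String (List String)) (h : pvRel d g) :
    pvRel (Ls.foldl (fun m l => l.foldl pvAStep m) d)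
      (Ls.foldl (fun m l => l.foldl pvGStep m) g) := by
  induction Ls generalizing d g with
  | nil => exact h
  | cons l t ih => exact ih _ _ (pvRel_foldl l d g h)

lemma pvGroups_nodup (Ls : List (List (String × String)))
    (g : PySem.Dict String (List String)) (h : g.keys.Nodup) :
    (Ls.foldl (fun m l => l.foldl pvGStep m) g).keys.Nodup := by
  induction Ls generalizing g with
  | nil => exact h
  | cons l t ih =>
    refine ih _ ?_
    exact PySem.Dict.nodup_keys_foldl_modify_key l Prod.fst [] (fun _ p vs => vs ++ [p.2]) g h

theorem pv_main (perm_dicts : List (List (String × String))) :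
    merge_permissions perm_dicts = merge_permissions_alt perm_dicts := by
  have hrel : pvRel
      (perm_dicts.foldl (fun m l => l.foldl pvAStep m) PySem.Dict.empty)
      (perm_dicts.foldl (fun m l => l.foldl pvGStep m) PySem.Dict.empty) := by
    refine pvRel_nested perm_dicts _ _ ⟨?_, ?_⟩
    · simp
    · intro k; simp
  set d := perm_dicts.foldl (fun m l => l.foldl pvAStep m) PySem.Dict.empty with hd
  set g := perm_dicts.foldl (fun m l => l.foldl pvGStep m) PySem.Dict.empty with hgdef
  obtain ⟨hk, hv⟩ := hrel
  have hgnd : g.keys.Nodup := pvGroups_nodup perm_dicts _ (by simp)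
  have hdnd : d.keys.Nodup := hk ▸ hgnd
  have hA : merge_permissions perm_dicts = d.items := by
    simp only [merge_permissions]
    rfl
  -- B's second loop inserts fresh distinct keys, so its items are a map over groups' items
  have hBitems :
      (g.items.foldl (fun merged p => merged.insert p.1 (pvResolve p.2)) PySem.Dict.empty).items
        = g.items.map (fun p => (p.1, pvResolve p.2)) := by
    have := PySem.Dict.items_foldl_insert_fresh (d := PySem.Dict.empty)
      (l := g.items) (k := Prod.fst) (v := fun p => pvResolve p.2)
      (by intro a _; simp) (by simpa using hgnd)
    simpa using this
  have hfold_eq : (perm_dicts.foldl (fun g perm_dict =>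
      perm_dict.foldl (fun g p => g.modify p.1 [] (fun vs => vs ++ [p.2])) g)
      PySem.Dict.empty) = g := by rw [hgdef]; rfl
  have hB : merge_permissions_alt perm_dicts = g.items.map (fun p => (p.1, pvResolve p.2)) := by
    simp only [merge_permissions_alt]
    rw [hfold_eq]
    exact hBitems
  rw [hA, hB]
  rw [PySem.Dict.items_eq_map_keys d hdnd "", PySem.Dict.items_eq_map_keys g hgnd [],
    List.map_map, hk]
  refine List.map_congr_left ?_
  intro k hkmem
  have hsome : ∃ vs, g.get? k = some vs := by
    rcases hx : g.get? k with _ | vs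
    · rw [PySem.Dict.get?_eq_none_iff_not_mem_keys] at hx
      exact absurd hkmem hx
    · exact ⟨vs, rfl⟩
  obtain ⟨vs, hvs⟩ := hsome
  have h1 : d.getD k "" = vs.foldl pvStep "read" :=
    PySem.Dict.getD_of_get?_eq_some _ _ (by rw [hv k, hvs]; rfl)
  have h2 : g.getD k [] = vs := PySem.Dict.getD_of_get?_eq_some _ _ hvs
  simp only [Function.comp, h1, h2, pvResolve_eq_foldl]

-- ===== VERDICT (by name: the statement is the Claim_ definition above) =====
theorem merge_permissions_spec : Claim_equal_merge_permissions := by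
  intro perm_dicts _
  unfold Spec_merge_permissions
  exact pv_main perm_dicts
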